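-- pv_equiv track=rewrite | github.com/KCourtney1/Code | python/compsci132/HW1/HW1.py | has_hoagie
-- ===== SOURCE A (Python) =====
-- def has_hoagie(num):
--     """
--         >>> has_hoagie(737)
--         True
--         >>> has_hoagie(35)
--         False
--         >>> has_hoagie(-6060)
--         True
--         >>> has_hoagie(-111)
--         True
--         >>> has_hoagie(6945)
--         False
--         >>> has_hoagie(1060)
--         True
--         >>> has_hoagie(12345678666123456)
--         True
--     """
--     #- YOUR CODE STARTS HERE
--
--     num = abs(num)
--     while num > 100:
--         digit_first = num%10
--         digit_second = num//100%10
--         if digit_first == digit_second: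
--             return True
--         num//=10
--     return False
-- ===== SOURCE B (Python) =====
-- def has_hoagie(num):
--     s = str(abs(num))
--     return any(a == b for a, b in zip(s, s[2:]))
-- ===== Notes on version B (the rewrite author's own statement) =====
-- stated objective: simpler
-- what changed: Replaces the mod/div integer-shifting while loop with a one-line scan of the decimal string, comparing each character to the one two places later via zip.
import Mathlib
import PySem

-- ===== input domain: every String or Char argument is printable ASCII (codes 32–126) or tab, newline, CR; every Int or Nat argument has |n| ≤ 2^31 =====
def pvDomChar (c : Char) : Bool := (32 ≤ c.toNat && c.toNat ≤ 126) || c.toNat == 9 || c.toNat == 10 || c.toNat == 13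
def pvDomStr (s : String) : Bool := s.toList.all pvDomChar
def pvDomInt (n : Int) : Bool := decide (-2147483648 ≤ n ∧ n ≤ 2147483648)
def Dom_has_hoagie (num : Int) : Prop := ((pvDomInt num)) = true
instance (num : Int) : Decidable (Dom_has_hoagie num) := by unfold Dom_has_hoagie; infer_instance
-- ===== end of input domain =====

-- B replaces A's mod/div integer-shifting while-loop by a one-line scan of the decimal
-- string, comparing each character with the one two places later (objective: simpler).

-- ===== PORT A =====
-- A-side helper: A's `while num > 100` loop (Python // and % via PySem; num stays ≥ 0 here).
def pvLoopA (n : Int) : Bool :=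
  if _h : n > 100 then
    if PySem.Int.mod n 10 == PySem.Int.mod (PySem.Int.floordiv n 100) 10 then true
    else pvLoopA (PySem.Int.floordiv n 10)
  else false
termination_by n.toNat
decreasing_by
  rw [PySem.Int.floordiv_eq_ediv_of_pos (by norm_num)]
  omega

def has_hoagie (num : Int) : Bool := pvLoopA |num|

-- ===== PORT B =====
-- B: s = str(abs(num)); return any(a == b for a, b in zip(s, s[2:]))
-- (the slice s[2:] of a string is exactly its character list with the first 2 dropped)
def has_hoagie_alt (num : Int) : Bool :=
  let s := PySem.Int.toStr |num|
  let l := s.toList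
  (l.zip (l.drop 2)).any (fun p => p.1 == p.2)

-- ===== PRECONDITION & SPEC =====
def Spec_has_hoagie (num : Int) (out : Bool) : Prop := out = has_hoagie_alt num
instance (num : Int) (out : Bool) : Decidable (Spec_has_hoagie num out) := by unfold Spec_has_hoagie; infer_instance

-- ===== CLAIM (what is proved, stated in full; the proofs are below) =====
def Claim_equal_has_hoagie : Prop := ∀ (num : Int), Dom_has_hoagie num → Spec_has_hoagie num (has_hoagie num)

-- ===== LEMMAS AND PROOFS =====

-- A's loop restated on Nat (the loop value is ≥ 0 throughout).
def pvLoopN (m : Nat) : Bool :=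
  if m > 100 then ((m % 10 == m / 100 % 10) || pvLoopN (m / 10)) else false
termination_by m
decreasing_by omega

-- "some element equals the one two positions later", scanned structurally.
def pvQ {α : Type} [BEq α] : List α → Bool
  | a :: b :: c :: t => (a == c) || pvQ (b :: c :: t)
  | _ => false

-- index form of pvQ, used to prove reversal invariance
def pvE {α : Type} [BEq α] (l : List α) : Prop := ∃ i, i + 2 < l.length ∧ l[i]? = l[i + 2]?

lemma pvNatCastBeq (a b : Nat) : (((a : Nat) : Int) == ((b : Nat) : Int)) = (a == b) := by
  by_cases h : a = b
  · simp [h]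
  · simp [h, (by exact_mod_cast h : ((a : Nat) : Int) ≠ ((b : Nat) : Int))]

lemma pvLoopA_natCast (m : Nat) : pvLoopA (m : Int) = pvLoopN m := by
  induction m using Nat.strong_induction_on with
  | _ m ih =>
    rw [pvLoopA, pvLoopN]
    by_cases h : m > 100
    · have h' : ((m : Int) > 100) := by exact_mod_cast h
      rw [dif_pos h', if_pos h]
      have e1 : PySem.Int.mod (m : Int) 10 = ((m % 10 : Nat) : Int) := by simp [pysem]
      have e2 : PySem.Int.mod (PySem.Int.floordiv (m : Int) 100) 10
          = ((m / 100 % 10 : Nat) : Int) := by simp [pysem]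
      have e3 : PySem.Int.floordiv (m : Int) 10 = ((m / 10 : Nat) : Int) := by simp [pysem]
      rw [e1, e2, e3, ih (m / 10) (by omega), pvNatCastBeq]
      cases m % 10 == m / 100 % 10 <;> rfl
    · have h' : ¬ ((m : Int) > 100) := by exact_mod_cast h
      rw [dif_neg h', if_neg h]

lemma pvQ_short {α : Type} [BEq α] (l : List α) (h : l.length ≤ 2) : pvQ l = false := by
  match l with
  | [] => rfl
  | [_] => rfl
  | [_, _] => rfl
  | _ :: _ :: _ :: _ => simp at h

lemma pvLoopN_eq_Q (m : Nat) : pvLoopN m = pvQ (Nat.digits 10 m) := by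
  induction m using Nat.strong_induction_on with
  | _ m ih =>
    rw [pvLoopN]
    by_cases h : m > 100
    · rw [if_pos h]
      have d1 : Nat.digits 10 m = m % 10 :: Nat.digits 10 (m / 10) :=
        Nat.digits_def' (by norm_num) (by omega)
      have d2 : Nat.digits 10 (m / 10) = m / 10 % 10 :: Nat.digits 10 (m / 100) := by
        rw [Nat.digits_def' (by norm_num) (by omega), Nat.div_div_eq_div_mul]
      have d3 : Nat.digits 10 (m / 100) = m / 100 % 10 :: Nat.digits 10 (m / 1000) := by
        rw [Nat.digits_def' (by norm_num) (by omega), Nat.div_div_eq_div_mul]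
      rw [d1, d2, d3, pvQ, ← d3, ← d2, ih (m / 10) (by omega)]
    · rw [if_neg h]
      rcases Nat.lt_or_ge m 100 with h2 | h2
      · exact (pvQ_short _ ((Nat.digits_length_le_iff (by norm_num) m).mpr (by omega))).symm
      · have hm : m = 100 := by omega
        subst hm
        have : Nat.digits 10 100 = [0, 0, 1] := by simp
        rw [this]; decide

lemma toDigitsCore_eq : ∀ (f n : Nat) (l : List Char), n < f →
    Nat.toDigitsCore 10 f n l
      = (if n = 0 then ['0'] else ((Nat.digits 10 n).map Nat.digitChar).reverse) ++ l := by
  intro f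
  induction f with
  | zero => intro n l h; omega
  | succ f ih =>
    intro n l h
    simp only [Nat.toDigitsCore]
    by_cases h0 : n / 10 = 0
    · rw [if_pos h0]
      by_cases hz : n = 0
      · subst hz; simp [Nat.digitChar]
      · have hn : n < 10 := by omega
        have : Nat.digits 10 n = [n] := by
          rw [Nat.digits_def' (by norm_num) (by omega), Nat.mod_eq_of_lt hn, h0, Nat.digits_zero]
        rw [if_neg hz, this, Nat.mod_eq_of_lt hn]
        simp
    · rw [if_neg h0]
      have hrec := ih (n / 10) (Nat.digitChar (n % 10) :: l) (by omega)
      rw [hrec, if_neg h0]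
      have hz : n ≠ 0 := by omega
      rw [if_neg hz,
        show Nat.digits 10 n = n % 10 :: Nat.digits 10 (n / 10) from
          Nat.digits_def' (by norm_num) (by omega)]
      simp only [List.map_cons, List.reverse_cons, List.append_assoc, List.singleton_append]

lemma toDigits_eq (m : Nat) : Nat.toDigits 10 m
    = if m = 0 then ['0'] else ((Nat.digits 10 m).map Nat.digitChar).reverse := by
  simpa [Nat.toDigits] using toDigitsCore_eq (m + 1) m [] (by omega)

lemma zipAny_eq_pvQ {α : Type} [BEq α] : ∀ l : List α,
    ((l.zip (l.drop 2)).any fun p => p.1 == p.2) = pvQ l := by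
  intro l
  match l with
  | [] => rfl
  | [_] => rfl
  | [_, _] => rfl
  | a :: b :: c :: t =>
    have ih := zipAny_eq_pvQ (b :: c :: t)
    simp only [List.drop_succ_cons, List.drop_zero] at ih ⊢
    simp only [List.zip_cons_cons, List.any_cons, pvQ, ih]

lemma pvQ_iff {α : Type} [BEq α] [LawfulBEq α] : ∀ l : List α, pvQ l = true ↔ pvE l := by
  intro l
  match l with
  | [] => simp [pvQ, pvE]
  | [_] => simp [pvQ, pvE]
  | [_, _] => simp [pvQ, pvE]
  | a :: b :: c :: t =>
    rw [pvQ, Bool.or_eq_true, beq_iff_eq, pvQ_iff (b :: c :: t)]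
    constructor
    · rintro (rfl | ⟨i, hi, he⟩)
      · exact ⟨0, by simp, by simp⟩
      · exact ⟨i + 1, by simpa using hi, by simpa using he⟩
    · rintro ⟨i, hi, he⟩
      match i with
      | 0 =>
        left
        simpa using he
      | i + 1 =>
        right
        exact ⟨i, by simpa using hi, by simpa using he⟩

lemma pvE_reverse_of {α : Type} [BEq α] (l : List α) (h : pvE l) : pvE l.reverse := by
  obtain ⟨i, hi, he⟩ := h
  refine ⟨l.length - 3 - i, ?_, ?_⟩
  · simpa using (by omega : l.length - 3 - i + 2 < l.length)
  · rw [List.getElem?_reverse (by omega), List.getElem?_reverse (by omega)]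
    have e1 : l.length - 1 - (l.length - 3 - i) = i + 2 := by omega
    have e2 : l.length - 1 - (l.length - 3 - i + 2) = i := by omega
    rw [e1, e2, he]

lemma pvQ_reverse {α : Type} [BEq α] [LawfulBEq α] (l : List α) : pvQ l.reverse = pvQ l := by
  rw [Bool.eq_iff_iff, pvQ_iff, pvQ_iff]
  constructor
  · intro h
    simpa using pvE_reverse_of l.reverse h
  · exact pvE_reverse_of l

lemma digitChar_beq (a c : Nat) (ha : a < 10) (hc : c < 10) :
    (Nat.digitChar a == Nat.digitChar c) = (a == c) := by
  interval_cases a <;> interval_cases c <;> decide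

lemma pvQ_map_digitChar : ∀ L : List Nat, (∀ x ∈ L, x < 10) →
    pvQ (L.map Nat.digitChar) = pvQ L := by
  intro L
  match L with
  | [] => intro _; rfl
  | [_] => intro _; rfl
  | [_, _] => intro _; rfl
  | a :: b :: c :: t =>
    intro hmem
    have ih := pvQ_map_digitChar (b :: c :: t) (fun x hx => hmem x (by simp at hx ⊢; tauto))
    simp only [List.map_cons] at ih ⊢
    rw [pvQ, pvQ, ih, digitChar_beq a c (hmem a (by simp)) (hmem c (by simp))]

-- ===== VERDICT (by name: the statement is the Claim_ definition above) =====
theorem has_hoagie_spec : Claim_equal_has_hoagie := by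
  intro num _
  unfold Spec_has_hoagie has_hoagie has_hoagie_alt
  show pvLoopA |num|
      = (((PySem.Int.toStr |num|).toList.zip ((PySem.Int.toStr |num|).toList.drop 2)).any
          fun p => p.1 == p.2)
  rw [Int.abs_eq_natAbs num]
  set m := num.natAbs with hm
  rw [pvLoopA_natCast, pvLoopN_eq_Q, PySem.Int.toList_toStr]
  have hchars : PySem.Int.toChars (m : Int) = Nat.toDigits 10 m := by
    simp [PySem.Int.toChars]
  rw [hchars, zipAny_eq_pvQ, toDigits_eq]
  by_cases h0 : m = 0
  · rw [if_pos h0, h0]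
    decide
  · rw [if_neg h0, pvQ_reverse,
      pvQ_map_digitChar _ (fun x hx => Nat.digits_lt_base (by norm_num) hx)]
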